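-- pv_equiv track=rewrite | github.com/SalesforceAIResearch/CodeTree | generators/parse.py | parse_first_func
-- ===== SOURCE A (Python) =====
-- from typing import Optional
--
-- def parse_first_func(code: str, lang: str) -> Optional[str]:
--     assert lang == "python", "Only python is supported for now. TODO: Rust"
--     code_lines = code.split("\n")
--     def_i = -1
--     last_i = 0
--     got_return = False
--     for i, line in enumerate(code_lines):
--         if line.startswith("def "):
--             if def_i == -1:
--                 def_i = i
--             else:
--                 break
--         elif "return" in line and def_i != -1:
--             got_return = True
--         if line == "" and def_i != -1 and got_return:
--             last_i = i
--             break
--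
--     if last_i == 0:
--         last_i = len(code_lines) - 1
--
--     if def_i == -1:
--         return ""
--
--     return "\n".join(code_lines[def_i:last_i+1]).rstrip("[/PYTHON]")
-- ===== SOURCE B (Python) =====
-- def parse_first_func(code: str, lang: str):
--     assert lang == "python", "Only python is supported for now. TODO: Rust"
--     lines = code.split("\n")
--     defs = [i for i, l in enumerate(lines) if l.startswith("def ")]
--     if not defs:
--         return ""
--     start = defs[0]
--     stop = defs[1] if len(defs) > 1 else len(lines)
--     body = lines[start + 1 : stop]
--     blanks = [k for k, l in enumerate(body)
--               if l == "" and any("return" in p for p in body[:k])]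
--     last = start + 1 + blanks[0] if blanks else len(lines) - 1
--     return "\n".join(lines[start : last + 1]).rstrip("[/PYTHON]")
-- ===== Notes on version B (the rewrite author's own statement) =====
-- stated objective: simpler
-- what changed: A's single stateful scan with a sentinel def_i, a got_return flag, last_i and two break paths is replaced by a declarative decomposition: list all 'def ' line indices, slice the window between the first and second def, and take the first blank line in it preceded by a 'return' line.
import Mathlib
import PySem

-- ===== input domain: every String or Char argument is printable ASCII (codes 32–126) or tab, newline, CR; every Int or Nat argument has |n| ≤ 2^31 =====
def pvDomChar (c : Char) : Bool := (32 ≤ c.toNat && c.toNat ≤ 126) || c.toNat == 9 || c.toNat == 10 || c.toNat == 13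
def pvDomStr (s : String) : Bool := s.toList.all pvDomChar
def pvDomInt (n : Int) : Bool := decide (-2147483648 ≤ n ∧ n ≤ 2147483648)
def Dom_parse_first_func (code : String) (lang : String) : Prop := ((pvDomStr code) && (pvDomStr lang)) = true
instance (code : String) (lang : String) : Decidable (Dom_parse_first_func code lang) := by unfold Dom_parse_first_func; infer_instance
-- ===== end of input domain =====

-- B replaces A's single stateful scan (sentinel def_i, flags got_return/last_i with breaks) by a
-- declarative decomposition: collect all `def `-line indices, slice out the window after the first
-- one, and pick the first blank line in it preceded by a `return` line.  Objective: simpler; not faster.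

-- s.rstrip("[/PYTHON]"): strip any of these chars from the right.  Ported by hand (PySem has no
-- rstrip-with-chars); exact on all inputs: drop trailing chars of the set, via reverse/dropWhile.
def pvRstrip (s : String) : String :=
  String.ofList ((s.toList.reverse.dropWhile (fun c => ['[', '/', 'P', 'Y', 'T', 'H', 'O', 'N', ']'].contains c)).reverse)

-- ===== PORT A =====
-- A's for-loop over enumerate(code_lines) carrying (def_i, last_i, got_return); breaks return the pair.
def pvLoopA : List String → Int → Int → Int → Bool → Int × Int
  | [], _, defI, lastI, _ => (defI, lastI)
  | l :: ls, i, defI, lastI, got =>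
    if PySem.Str.startswith l "def " then
      if defI = -1 then
        -- def_i := i, then the trailing blank-line check of the same iteration
        if l == "" && decide ((i : Int) ≠ -1) && got then (i, i)
        else pvLoopA ls (i + 1) i lastI got
      else (defI, lastI)          -- second def: break
    else
      let got' := if PySem.Str.isIn "return" l && decide (defI ≠ -1) then true else got
      if l == "" && decide (defI ≠ -1) && got' then (defI, i)   -- last_i := i; break
      else pvLoopA ls (i + 1) defI lastI got'

def parse_first_func (code : String) (lang : String) : Option String :=
  if lang = "python" then
    let lines := (PySem.Str.split? code "\n").getD []   -- sep ≠ "": split? is always some here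
    let r := pvLoopA lines 0 (-1) 0 false
    let defI := r.1
    let lastI := if r.2 = 0 then (lines.length : Int) - 1 else r.2
    if defI = -1 then some ""
    else some (pvRstrip (PySem.Str.join "\n" (PySem.List.slice lines (some defI) (some (lastI + 1)))))
  else none   -- assert fails: AssertionError (outside Pre_)

-- ===== PORT B =====
def parse_first_func_alt (code : String) (lang : String) : Option String :=
  if lang = "python" then
    let lines := (PySem.Str.split? code "\n").getD []
    let defs := ((PySem.List.enumerate lines 0).filter (fun p => PySem.Str.startswith p.2 "def ")).map (·.1)
    match defs with
    | [] => some ""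
    | start :: rest =>
      let stop : Int := match rest with | s :: _ => s | [] => (lines.length : Int)
      let body := PySem.List.slice lines (some (start + 1)) (some stop)
      let blanks := ((PySem.List.enumerate body 0).filter
          (fun p => p.2 == "" && (PySem.List.slice body none (some p.1)).any (fun q => PySem.Str.isIn "return" q))).map (·.1)
      let last : Int := match blanks with | k :: _ => start + 1 + k | [] => (lines.length : Int) - 1
      some (pvRstrip (PySem.Str.join "\n" (PySem.List.slice lines (some start) (some (last + 1)))))
  else none

-- ===== PRECONDITION & SPEC =====
-- A asserts lang == "python" and raises AssertionError otherwise: exactly those inputs are excluded.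
def Pre_parse_first_func (code : String) (lang : String) : Prop := lang = "python"
instance (code : String) (lang : String) : Decidable (Pre_parse_first_func code lang) := by unfold Pre_parse_first_func; infer_instance
def pvWitness_parse_first_func : String × String := ("def f():\n  return 1\n\nx", "python")

def Spec_parse_first_func (code : String) (lang : String) (out : Option String) : Prop := out = parse_first_func_alt code lang
instance (code : String) (lang : String) (out : Option String) : Decidable (Spec_parse_first_func code lang out) := by unfold Spec_parse_first_func; infer_instance

-- ===== CLAIM (what is proved, stated in full; the proofs are below) =====
def Claim_equal_parse_first_func : Prop := ∀ (code : String) (lang : String), Dom_parse_first_func code lang → Pre_parse_first_func code lang → Spec_parse_first_func code lang (parse_first_func code lang)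

-- ===== LEMMAS AND PROOFS =====

-- abbreviations for the two line predicates
def pvP (l : String) : Bool := PySem.Str.startswith l "def "
def pvR (l : String) : Bool := PySem.Str.isIn "return" l

-- the blank-line search both programs perform after the first def, as a pure function:
-- first index (relative) of a line that is "" after a "return" line, stopping at a def line
def pvFindB : List String → Bool → Option Int
  | [], _ => none
  | l :: ls, got =>
    if pvP l then none
    else
      let got' := got || pvR l
      if l == "" && got' then some 0 else (pvFindB ls got').map (· + 1)

lemma loopA_skip (pre : List String) : ∀ (ls : List String) (i : Int), (∀ l ∈ pre, pvP l = false) →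
    pvLoopA (pre ++ ls) i (-1) 0 false = pvLoopA ls (i + pre.length) (-1) 0 false := by
  induction pre with
  | nil => intro ls i _; simp
  | cons l pre ih =>
    intro ls i h
    have hl : PySem.Str.startswith l "def " = false := by have := h l (by simp); simpa [pvP] using this
    simp only [List.cons_append, pvLoopA, hl]
    simp only [Bool.false_eq_true, if_false, decide_eq_true_eq]
    have e : (decide ((-1:Int) ≠ -1)) = false := by decide
    simp only [e, Bool.and_false, Bool.false_eq_true, if_false, Bool.false_and]
    rw [ih ls (i + 1) (fun x hx => h x (by simp [hx]))]
    congr 1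
    simp only [List.length_cons]
    push_cast
    ring

lemma loopA_def (dl : String) (ls : List String) (i : Int) (h : pvP dl = true) :
    pvLoopA (dl :: ls) i (-1) 0 false = pvLoopA ls (i + 1) i 0 false := by
  simp only [pvP] at h
  simp only [pvLoopA, h, if_true, Bool.and_false]
  simp

lemma loopA_found (ls : List String) : ∀ (i d lastI : Int) (got : Bool), d ≠ -1 →
    pvLoopA ls i d lastI got = (d, match pvFindB ls got with | some k => i + k | none => lastI) := by
  induction ls with
  | nil => intro i d lastI got hd; simp [pvLoopA, pvFindB]
  | cons l ls ih =>
    intro i d lastI got hd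
    have hdd : decide (d ≠ -1) = true := decide_eq_true hd
    simp only [pvLoopA, pvFindB, pvP, pvR, hdd, Bool.and_true]
    cases hp : PySem.Str.startswith l "def "
    · simp only [hp, Bool.false_eq_true, if_false]
      have hgot : (if (PySem.Str.isIn "return" l) = true then true else got) = (got || PySem.Str.isIn "return" l) := by
        cases PySem.Str.isIn "return" l <;> simp
      rw [hgot]
      cases hc : (l == "" && (got || PySem.Str.isIn "return" l))
      · simp only [hc, Bool.false_eq_true, if_false]
        rw [ih (i+1) d lastI _ hd]
        cases h : pvFindB ls (got || PySem.Str.isIn "return" l) <;> simp [h] <;> ring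
      · simp [hc]
    · simp [hp, if_neg hd]

lemma findB_stop (bs : List String) : ∀ (l2 : String) (rest : List String) (got : Bool),
    pvP l2 = true → pvFindB (bs ++ l2 :: rest) got = pvFindB bs got := by
  induction bs with
  | nil => intro l2 rest got h; simp [pvFindB, h]
  | cons l bs ih =>
    intro l2 rest got h
    simp only [List.cons_append, pvFindB]
    rw [ih l2 rest _ h]

lemma defs_skip (pre : List String) : ∀ (ys : List String) (s : Int), (∀ l ∈ pre, pvP l = false) →
    (PySem.List.enumerate (pre ++ ys) s).filter (fun p => PySem.Str.startswith p.2 "def ")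
      = (PySem.List.enumerate ys (s + pre.length)).filter (fun p => PySem.Str.startswith p.2 "def ") := by
  induction pre with
  | nil => intro ys s _; simp
  | cons l pre ih =>
    intro ys s h
    have hl : PySem.Str.startswith l "def " = false := by have := h l (by simp); simpa [pvP] using this
    simp only [List.cons_append, PySem.List.enumerate_cons, List.filter_cons, hl]
    rw [ih ys (s+1) (fun x hx => h x (by simp [hx]))]
    congr 1
    simp only [List.length_cons]
    push_cast
    ring

lemma pvR_empty : pvR "" = false := by decide

lemma blanks_eval (bs : List String) : ∀ (acc : List String) (s : Int), s = (acc.length : Int) →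
    (∀ l ∈ bs, pvP l = false) →
    (((PySem.List.enumerate bs s).filter (fun p => p.2 == "" && (PySem.List.slice (acc ++ bs) none (some p.1)).any (fun q => PySem.Str.isIn "return" q))).map (·.1)).head?
      = (pvFindB bs (acc.any pvR)).map (fun k => s + k) := by
  induction bs with
  | nil => intro acc s hs h; simp [pvFindB]
  | cons l bs ih =>
    intro acc s hs h
    have hP : pvP l = false := h l (by simp)
    have hslice : PySem.List.slice (acc ++ l :: bs) none (some s) = acc := by
      rw [hs, PySem.List.slice_to_natCast]
      exact List.take_left
    simp only [PySem.List.enumerate_cons, List.filter_cons]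
    rw [hslice]
    cases hc : (l == "" && acc.any fun q => PySem.Str.isIn "return" q)
    · simp only [hc, Bool.false_eq_true, if_false]
      rw [show acc ++ l :: bs = (acc ++ [l]) ++ bs from by simp]
      rw [ih (acc ++ [l]) (s+1) (by simp [hs]) (fun x hx => h x (by simp [hx]))]
      simp only [pvFindB, hP, Bool.false_eq_true, if_false]
      have hcond : (l == "" && (List.any acc pvR || pvR l)) = false := by
        cases he : (l == "")
        · simp
        · have hl : l = "" := by simpa using he
          subst hl
          have ha : acc.any (fun q => PySem.Str.isIn "return" q) = false := by simpa [he] using hc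
          simp [pvR_empty]
          simpa [pvR] using ha
      rw [hcond]
      have hany : (acc ++ [l]).any pvR = (acc.any pvR || pvR l) := by simp
      rw [hany]
      cases hfb : pvFindB bs (acc.any pvR || pvR l) <;> simp [hfb] <;> ring
    · simp only [hc, if_true]
      obtain ⟨he, ha⟩ := Bool.and_eq_true_iff.mp hc
      have hl : l = "" := by simpa using he
      subst hl
      simp only [pvFindB, hP, Bool.false_eq_true, if_false]
      have : (("" : String) == "" && (acc.any pvR || pvR "")) = true := by
        simp [pvR_empty]
        simpa [pvR] using ha
      rw [this]
      simp

lemma findB_nonneg (ls : List String) : ∀ (got : Bool) (k : Int), pvFindB ls got = some k → 0 ≤ k := by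
  induction ls with
  | nil => intro got k h; simp [pvFindB] at h
  | cons l ls ih =>
    intro got k h
    simp only [pvFindB] at h
    by_cases hp : pvP l = true
    · simp [hp] at h
    · simp only [Bool.not_eq_true] at hp
      rw [if_neg (by simp [hp])] at h
      by_cases hc : (l == "" && (got || pvR l)) = true
      · rw [if_pos hc] at h; simp at h; omega
      · rw [if_neg hc] at h
        cases hfb : pvFindB ls (got || pvR l) with
        | none => rw [hfb] at h; simp at h
        | some k' => rw [hfb] at h; simp at h; have := ih _ _ hfb; omega

lemma slice_window (pre : List String) (dl : String) (body tail2 : List String) :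
    PySem.List.slice (pre ++ dl :: (body ++ tail2)) (some ((pre.length : Int) + 1)) (some ((pre.length : Int) + 1 + (body.length : Int))) = body := by
  have h1 : ((pre.length : Int) + 1) = ((pre.length + 1 : Nat) : Int) := by push_cast; ring
  have h2 : ((pre.length : Int) + 1 + (body.length : Int)) = ((pre.length + 1 + body.length : Nat) : Int) := by push_cast; ring
  rw [h2, h1, PySem.List.slice_natCast]
  have h3 : pre ++ dl :: (body ++ tail2) = (pre ++ [dl]) ++ (body ++ tail2) := by simp
  rw [h3, List.drop_left' (by simp)]
  have h4 : pre.length + 1 + body.length - (pre.length + 1) = body.length := by omega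
  rw [h4, List.take_left]

lemma defs_nil (bs : List String) (s : Int) (h : ∀ l ∈ bs, pvP l = false) :
    (PySem.List.enumerate bs s).filter (fun p => PySem.Str.startswith p.2 "def ") = [] := by
  have := defs_skip bs [] s h
  simpa using this

lemma slice_window' (pre : List String) (dl : String) (body : List String) :
    PySem.List.slice (pre ++ dl :: body) (some ((pre.length : Int) + 1)) (some ((pre.length : Int) + 1 + (body.length : Int))) = body := by
  have := slice_window pre dl body []
  simpa using this

lemma head_dropWhile_P (xs : List String) : ∀ x ∈ (xs.dropWhile (fun l => !pvP l)).head?, pvP x = true := by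
  intro x hx
  have hne : xs.dropWhile (fun l => !pvP l) ≠ [] := by
    intro hn; rw [hn] at hx; simp at hx
  have hh := List.head_dropWhile_not (fun l => !pvP l) (l := xs) hne
  rw [List.head?_eq_some_head hne] at hx
  have hx' : (xs.dropWhile (fun l => !pvP l)).head hne = x := by
    have := hx; simp at this; exact this
  rw [← hx']
  simpa using hh

-- ===== VERDICT (by name: the statement is the Claim_ definition above) =====
theorem parse_first_func_spec : Claim_equal_parse_first_func := by
  intro code lang _ hpre
  unfold Pre_parse_first_func at hpre
  subst hpre
  unfold Spec_parse_first_func parse_first_func parse_first_func_alt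
  rw [if_pos rfl, if_pos rfl]
  generalize (PySem.Str.split? code "\n").getD [] = lines
  dsimp only
  have hsplit : lines.takeWhile (fun l => !pvP l) ++ lines.dropWhile (fun l => !pvP l) = lines :=
    List.takeWhile_append_dropWhile
  have hpreF : ∀ l ∈ lines.takeWhile (fun l => !pvP l), pvP l = false := by
    intro l hl; simpa using List.mem_takeWhile_imp hl
  have hheadF : ∀ dl ∈ (lines.dropWhile (fun l => !pvP l)).head?, pvP dl = true :=
    head_dropWhile_P lines
  generalize hdw : lines.dropWhile (fun l => !pvP l) = rest at hsplit hheadF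
  generalize hpre : lines.takeWhile (fun l => !pvP l) = pre at hsplit hpreF
  rw [← hsplit]
  cases rest with
  | nil =>
    rw [List.append_nil, show (pre : List String) = pre ++ [] from (List.append_nil pre).symm,
        loopA_skip _ _ 0 hpreF, defs_skip _ _ 0 hpreF]
    simp [pvLoopA]
  | cons dl tail =>
    have hdl : pvP dl = true := hheadF dl (by simp)
    have hdlS : PySem.Str.startswith dl "def " = true := by simpa [pvP] using hdl
    rw [loopA_skip _ _ 0 hpreF, loopA_def dl tail _ hdl,
        loopA_found tail _ _ _ _ (by omega),
        defs_skip _ _ 0 hpreF, PySem.List.enumerate_cons, List.filter_cons]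
    dsimp only
    simp only [hdlS, if_true, List.map_cons, zero_add]
    rw [if_neg (show ¬((pre.length : Int) = -1) by omega)]
    have hsplit2 : tail.takeWhile (fun l => !pvP l) ++ tail.dropWhile (fun l => !pvP l) = tail :=
      List.takeWhile_append_dropWhile
    have hbodyF : ∀ l ∈ tail.takeWhile (fun l => !pvP l), pvP l = false := by
      intro l hl; simpa using List.mem_takeWhile_imp hl
    have hheadF2 : ∀ x ∈ (tail.dropWhile (fun l => !pvP l)).head?, pvP x = true :=
      head_dropWhile_P tail
    generalize hdw2 : tail.dropWhile (fun l => !pvP l) = rest2 at hsplit2 hheadF2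
    generalize hpre2 : tail.takeWhile (fun l => !pvP l) = body at hsplit2 hbodyF
    rw [← hsplit2]
    cases rest2 with
    | nil =>
      rw [List.append_nil, defs_nil _ _ hbodyF]
      simp only [List.map_nil]
      have hlen : (((pre ++ dl :: body).length : Nat) : Int) = (pre.length : Int) + 1 + (body.length : Int) := by
        simp only [List.length_append, List.length_cons]; push_cast; ring
      rw [hlen, slice_window' pre dl body]
      have hb := blanks_eval body [] 0 (by simp) hbodyF
      simp only [List.nil_append, List.any_nil, zero_add] at hb
      cases hfb : pvFindB body false with
      | none =>
        rw [hfb] at hb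
        simp only [Option.map_none] at hb
        rw [List.head?_eq_none_iff.mp hb]
        norm_num
      | some k =>
        rw [hfb] at hb
        simp only [Option.map_some] at hb
        obtain ⟨tl, htl⟩ := List.head?_eq_some_iff.mp hb
        have hk := findB_nonneg body false k hfb
        rw [htl]
        dsimp only
        rw [if_neg (show ¬((pre.length : Int) + 1 + k = 0) by omega)]
    | cons l2 tail2 =>
      have hdl2 : pvP l2 = true := hheadF2 l2 (by simp)
      have hdl2S : PySem.Str.startswith l2 "def " = true := by simpa [pvP] using hdl2
      rw [defs_skip _ _ _ hbodyF, PySem.List.enumerate_cons, List.filter_cons]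
      dsimp only
      simp only [hdl2S, if_true, List.map_cons]
      rw [slice_window pre dl body (l2 :: tail2)]
      rw [findB_stop body l2 tail2 false hdl2]
      have hb := blanks_eval body [] 0 (by simp) hbodyF
      simp only [List.nil_append, List.any_nil, zero_add] at hb
      cases hfb : pvFindB body false with
      | none =>
        rw [hfb] at hb
        simp only [Option.map_none] at hb
        rw [List.head?_eq_none_iff.mp hb]
        norm_num
      | some k =>
        rw [hfb] at hb
        simp only [Option.map_some] at hb
        obtain ⟨tl, htl⟩ := List.head?_eq_some_iff.mp hb
        have hk := findB_nonneg body false k hfb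
        rw [htl]
        dsimp only
        rw [if_neg (show ¬((pre.length : Int) + 1 + k = 0) by omega)]
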